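-- pv_equiv track=rewrite | github.com/mcimpoi/advent_of_code | 2025/python/day_04.py | to_remove_rolls
-- ===== SOURCE A (Python) =====
-- def to_remove_rolls(grid: list[list[str]]) -> list[tuple[int, int]]:
--     n_rows, n_cols = len(grid), len(grid[0])
--     res = []
--     for row in range(n_rows):
--         for col in range(n_cols):
--             if grid[row][col] == "@":
--                 neighbors = 0
--                 for dr in range(-1, 2):
--                     for dc in range(-1, 2):
--                         if dr == 0 and dc == 0:
--                             continue
--                         if (
--                             0 <= row + dr < n_rows
--                             and 0 <= col + dc < n_cols
--                             and grid[row + dr][col + dc] == "@"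
--                         ):
--                             neighbors += 1
--                 if neighbors < 4:
--                     res.append((row, col))
--     return res
-- ===== SOURCE B (Python) =====
-- def to_remove_rolls(grid: list[list[str]]) -> list[tuple[int, int]]:
--     n_rows, n_cols = len(grid), len(grid[0])
--     counts = {}
--     for r in range(n_rows):
--         for c in range(n_cols):
--             if grid[r][c] == "@":
--                 for nr in range(max(r - 1, 0), min(r + 2, n_rows)):
--                     for nc in range(max(c - 1, 0), min(c + 2, n_cols)):
--                         if (nr, nc) != (r, c):
--                             counts[(nr, nc)] = counts.get((nr, nc), 0) + 1
--     return [
--         (r, c)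
--         for r in range(n_rows)
--         for c in range(n_cols)
--         if grid[r][c] == "@" and counts.get((r, c), 0) < 4
--     ]
-- ===== Notes on version B (the rewrite author's own statement) =====
-- stated objective: alternative
-- what changed: A counts each '@' cell's neighbors with an inline 3x3 gather loop per cell; B instead does a scatter pass (every '@' cell increments a dict entry for each of its in-bounds neighbor positions) followed by a separate row-major collect pass reading the precomputed counts.
import Mathlib
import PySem

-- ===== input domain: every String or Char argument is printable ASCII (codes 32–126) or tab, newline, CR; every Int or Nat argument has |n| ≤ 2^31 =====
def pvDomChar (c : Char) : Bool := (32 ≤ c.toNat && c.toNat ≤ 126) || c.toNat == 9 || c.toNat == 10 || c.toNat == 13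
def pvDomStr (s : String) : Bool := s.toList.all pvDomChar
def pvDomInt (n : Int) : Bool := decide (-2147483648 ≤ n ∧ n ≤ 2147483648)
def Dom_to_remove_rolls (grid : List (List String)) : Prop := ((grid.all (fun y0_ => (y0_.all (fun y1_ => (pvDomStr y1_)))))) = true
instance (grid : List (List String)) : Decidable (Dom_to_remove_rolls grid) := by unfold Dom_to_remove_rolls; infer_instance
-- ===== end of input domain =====

-- B replaces A's per-cell 3x3 gather of neighbor counts by a scatter pass (each '@' cell
-- increments a dict entry for each in-bounds neighbor) followed by a row-major collect pass;
-- same results, a genuinely different counting decomposition (no speed claim).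

-- ===== PORT A =====
def to_remove_rolls (grid : List (List String)) : List (Int × Int) :=
  let n_rows : Int := grid.length
  let n_cols : Int := (PySem.List.pyGetD grid 0 []).length
  (PySem.List.pyRange 0 n_rows).foldl (fun res row =>
    (PySem.List.pyRange 0 n_cols).foldl (fun res col =>
      if PySem.List.pyGetD (PySem.List.pyGetD grid row []) col "" = "@" then
        let neighbors : Int :=
          (PySem.List.pyRange (-1) 2).foldl (fun nb dr =>
            (PySem.List.pyRange (-1) 2).foldl (fun nb dc =>
              if dr = 0 ∧ dc = 0 then nb
              else if 0 ≤ row + dr ∧ row + dr < n_rows ∧ 0 ≤ col + dc ∧ col + dc < n_cols ∧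
                  PySem.List.pyGetD (PySem.List.pyGetD grid (row + dr) []) (col + dc) "" = "@"
                then nb + 1 else nb) nb) 0
        if neighbors < 4 then res ++ [(row, col)] else res
      else res) res) []

-- ===== PORT B =====
def to_remove_rolls_alt (grid : List (List String)) : List (Int × Int) :=
  let n_rows : Int := grid.length
  let n_cols : Int := (PySem.List.pyGetD grid 0 []).length
  let counts : PySem.Dict (Int × Int) Int :=
    (PySem.List.pyRange 0 n_rows).foldl (fun cnts r =>
      (PySem.List.pyRange 0 n_cols).foldl (fun cnts c =>
        if PySem.List.pyGetD (PySem.List.pyGetD grid r []) c "" = "@" then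
          (PySem.List.pyRange (max (r - 1) 0) (min (r + 2) n_rows)).foldl (fun cnts nr =>
            (PySem.List.pyRange (max (c - 1) 0) (min (c + 2) n_cols)).foldl (fun cnts nc =>
              if (nr, nc) ≠ (r, c) then cnts.modify (nr, nc) 0 (· + 1) else cnts) cnts) cnts
        else cnts) cnts) PySem.Dict.empty
  (PySem.List.pyRange 0 n_rows).foldl (fun res r =>
    (PySem.List.pyRange 0 n_cols).foldl (fun res c =>
      if PySem.List.pyGetD (PySem.List.pyGetD grid r []) c "" = "@" ∧ counts.getD (r, c) 0 < 4
        then res ++ [(r, c)] else res) res) []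

-- ===== PRECONDITION & SPEC =====
-- Pre_ excludes exactly the inputs on which A raises IndexError: the empty grid (grid[0]),
-- and ragged grids where some row is shorter than row 0 (grid[row][col] for col < len(grid[0])).
def Pre_to_remove_rolls (grid : List (List String)) : Prop :=
  grid ≠ [] ∧ ∀ row ∈ grid, (grid.headD []).length ≤ row.length
instance (grid : List (List String)) : Decidable (Pre_to_remove_rolls grid) := by
  unfold Pre_to_remove_rolls; infer_instance
def pvWitness_to_remove_rolls : List (List String) := [["@", "@"], [".", "@"]]
def Spec_to_remove_rolls (grid : List (List String)) (out : List (Int × Int)) : Prop := out = to_remove_rolls_alt grid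
instance (grid : List (List String)) (out : List (Int × Int)) : Decidable (Spec_to_remove_rolls grid out) := by unfold Spec_to_remove_rolls; infer_instance

-- ===== CLAIM (what is proved, stated in full; the proofs are below) =====
def Claim_equal_to_remove_rolls : Prop := ∀ (grid : List (List String)), Dom_to_remove_rolls grid → Pre_to_remove_rolls grid → Spec_to_remove_rolls grid (to_remove_rolls grid)

-- ===== LEMMAS AND PROOFS =====

-- generic loop-shape lemmas -------------------------------------------------

/-- A nested loop that folds the inner list's elements into the accumulator is a fold
over the flattened list. -/
theorem pvFoldlFlatMap {α β γ : Type} (l : List α) (f : α → List β) (g : γ → β → γ)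
    (init : γ) :
    l.foldl (fun acc x => (f x).foldl g acc) init = (l.flatMap f).foldl g init := by
  induction l generalizing init with
  | nil => rfl
  | cons x xs ih => simp [List.foldl_append, ih]

theorem pvFoldlIte {α γ : Type} (b : Prop) [Decidable b] (l : List α) (g : γ → α → γ)
    (init : γ) :
    (if b then l.foldl g init else init) = (if b then l else []).foldl g init := by
  split <;> rfl

/-- Counting in a flatMap whose pieces contain the element at most once. -/
theorem pvCountFlatMap {α β : Type} [BEq β] [LawfulBEq β] [DecidableEq β] (l : List α) (f : α → List β) (b : β)
    (h : ∀ x ∈ l, (f x).count b ≤ 1) :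
    (l.flatMap f).count b = l.countP (fun x => decide (b ∈ f x)) := by
  induction l with
  | nil => rfl
  | cons x xs ih =>
    simp only [List.flatMap_cons, List.count_append, List.countP_cons]
    rw [ih (fun y hy => h y (List.mem_cons_of_mem _ hy))]
    by_cases hb : b ∈ f x
    · have h1 : (f x).count b = 1 :=
        le_antisymm (h x (List.mem_cons_self)) (List.count_pos_iff.mpr hb)
      simp [hb, h1, Nat.add_comm]
    · simp [hb, List.count_eq_zero.mpr hb]

/-- Counting over a Nodup list equals counting over any Nodup list of candidates that
covers the support of the predicate. -/
theorem pvCountPBox {α : Type} [DecidableEq α] (l box : List α) (p : α → Bool)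
    (hl : l.Nodup) (hbox : box.Nodup) (hsupp : ∀ x ∈ l, p x → x ∈ box) :
    l.countP p = box.countP (fun x => decide (x ∈ l) && p x) := by
  have hperm : (l.filter p).Perm (box.filter (fun x => decide (x ∈ l) && p x)) := by
    rw [List.perm_ext_iff_of_nodup (hl.filter p) (hbox.filter _)]
    intro a
    simp only [List.mem_filter, Bool.and_eq_true, decide_eq_true_eq]
    constructor
    · rintro ⟨ha, hp⟩; exact ⟨hsupp a ha hp, ha, hp⟩
    · rintro ⟨_, ha, hp⟩; exact ⟨ha, hp⟩
  simp only [List.countP_eq_length_filter]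
  exact hperm.length_eq

-- abstract scatter / gather -------------------------------------------------

def pvNk (nrows ncols r c : Int) : List (Int × Int) :=
  ((PySem.List.pyRange (max (r - 1) 0) (min (r + 2) nrows)).product
    (PySem.List.pyRange (max (c - 1) 0) (min (c + 2) ncols))).filter (fun k => k ≠ (r, c))

def pvPairs (nrows ncols : Int) : List (Int × Int) :=
  (PySem.List.pyRange 0 nrows).product (PySem.List.pyRange 0 ncols)

def pvKeys (nrows ncols : Int) (A : Int → Int → Prop) [inst : ∀ x y, Decidable (A x y)] :
    List (Int × Int) :=
  (PySem.List.pyRange 0 nrows).flatMap (fun r =>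
    (PySem.List.pyRange 0 ncols).flatMap (fun c =>
      if A r c then pvNk nrows ncols r c else []))

def pvScatter (nrows ncols : Int) (A : Int → Int → Prop) [inst : ∀ x y, Decidable (A x y)] :
    PySem.Dict (Int × Int) Int :=
  (PySem.List.pyRange 0 nrows).foldl (fun cnts r =>
    (PySem.List.pyRange 0 ncols).foldl (fun cnts c =>
      if A r c then
        (PySem.List.pyRange (max (r - 1) 0) (min (r + 2) nrows)).foldl (fun cnts nr =>
          (PySem.List.pyRange (max (c - 1) 0) (min (c + 2) ncols)).foldl (fun cnts nc =>
            if (nr, nc) ≠ (r, c) then cnts.modify (nr, nc) 0 (· + 1) else cnts) cnts) cnts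
      else cnts) cnts) PySem.Dict.empty

def pvGather (nrows ncols : Int) (A : Int → Int → Prop) [inst : ∀ x y, Decidable (A x y)]
    (row col : Int) : Int :=
  (PySem.List.pyRange (-1) 2).foldl (fun nb dr =>
    (PySem.List.pyRange (-1) 2).foldl (fun nb dc =>
      if dr = 0 ∧ dc = 0 then nb
      else if 0 ≤ row + dr ∧ row + dr < nrows ∧ 0 ≤ col + dc ∧ col + dc < ncols ∧
          A (row + dr) (col + dc)
        then nb + 1 else nb) nb) 0

theorem pvNk_nodup (nrows ncols r c : Int) : (pvNk nrows ncols r c).Nodup :=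
  ((PySem.List.nodup_pyRange_one _ _).product (PySem.List.nodup_pyRange_one _ _)).filter _

theorem pvMem_pvNk (nrows ncols r c x y : Int) :
    (x, y) ∈ pvNk nrows ncols r c ↔
      (max (r - 1) 0 ≤ x ∧ x < min (r + 2) nrows) ∧
      (max (c - 1) 0 ≤ y ∧ y < min (c + 2) ncols) ∧ ¬(x = r ∧ y = c) := by
  simp only [pvNk, List.mem_filter, List.pair_mem_product, PySem.List.mem_pyRange_one,
    ne_eq, Prod.mk.injEq, decide_eq_true_eq, not_and]
  tauto

theorem pvMem_pvPairs (nrows ncols x y : Int) :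
    (x, y) ∈ pvPairs nrows ncols ↔ (0 ≤ x ∧ x < nrows) ∧ (0 ≤ y ∧ y < ncols) := by
  simp [pvPairs, List.pair_mem_product, PySem.List.mem_pyRange_one]

/-- A guarded loop body (decidable Prop guard) is a fold over the filtered list. -/
theorem pvFoldlIfFilterP {α γ : Type} (l : List α) (p : α → Prop) [DecidablePred p]
    (g : γ → α → γ) (init : γ) :
    l.foldl (fun acc x => if p x then g acc x else acc) init
      = (l.filter (fun x => decide (p x))).foldl g init := by
  induction l generalizing init with
  | nil => rfl
  | cons x xs ih => by_cases h : p x <;> simp [h, ih]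

theorem pvFilterFlatMap {α β : Type} (l : List α) (f : α → List β) (p : β → Bool) :
    (l.flatMap f).filter p = l.flatMap (fun x => (f x).filter p) := by
  induction l with
  | nil => rfl
  | cons x xs ih => simp [List.filter_append, ih]

theorem pvScatter_eq_fold (nrows ncols : Int) (A : Int → Int → Prop)
    [inst : ∀ x y, Decidable (A x y)] :
    pvScatter nrows ncols A =
      (pvKeys nrows ncols A).foldl (fun d k => d.modify k 0 (· + 1)) PySem.Dict.empty := by
  have h1 : ∀ (r c : Int) (cnts : PySem.Dict (Int × Int) Int),
      (PySem.List.pyRange (max (r - 1) 0) (min (r + 2) nrows)).foldl (fun cnts nr =>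
        (PySem.List.pyRange (max (c - 1) 0) (min (c + 2) ncols)).foldl (fun cnts nc =>
          if (nr, nc) ≠ (r, c) then cnts.modify (nr, nc) 0 (· + 1) else cnts) cnts) cnts
      = (pvNk nrows ncols r c).foldl (fun d k => d.modify k 0 (· + 1)) cnts := by
    intro r c cnts
    have h0 : ∀ (nr : Int) (cnts : PySem.Dict (Int × Int) Int),
        (PySem.List.pyRange (max (c - 1) 0) (min (c + 2) ncols)).foldl (fun cnts nc =>
          if (nr, nc) ≠ (r, c) then cnts.modify (nr, nc) 0 (· + 1) else cnts) cnts
        = (((PySem.List.pyRange (max (c - 1) 0) (min (c + 2) ncols)).map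
            (Prod.mk nr)).filter (fun k => k ≠ (r, c))).foldl
              (fun d k => d.modify k 0 (· + 1)) cnts := by
      intro nr cnts
      rw [List.filter_map, List.foldl_map, pvFoldlIfFilterP _ (fun nc => (nr, nc) ≠ (r, c))]
      rfl
    simp only [h0]
    rw [pvFoldlFlatMap]
    have : pvNk nrows ncols r c
        = (PySem.List.pyRange (max (r - 1) 0) (min (r + 2) nrows)).flatMap (fun nr =>
            ((PySem.List.pyRange (max (c - 1) 0) (min (c + 2) ncols)).map
              (Prod.mk nr)).filter (fun k => k ≠ (r, c))) := by
      rw [pvNk, ← pvFilterFlatMap]; rfl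
    rw [this]
  unfold pvScatter
  simp only [h1, pvFoldlIte, pvFoldlFlatMap]
  rfl

theorem pvScatter_getD (nrows ncols : Int) (A : Int → Int → Prop)
    [inst : ∀ x y, Decidable (A x y)] (k : Int × Int) :
    (pvScatter nrows ncols A).getD k 0 = ((pvKeys nrows ncols A).count k : Int) := by
  rw [pvScatter_eq_fold, PySem.Dict.getD_foldl_modify_add_one]
  simp

def pvOff : List (Int × Int) := (PySem.List.pyRange (-1) 2).product (PySem.List.pyRange (-1) 2)

theorem pvProdFlatMap {α β : Type} (l₁ : List α) (l₂ : List β) :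
    l₁.product l₂ = l₁.flatMap (fun x => l₂.map (Prod.mk x)) := rfl

theorem pvFoldlCountP {α : Type} (l : List α) (p : α → Prop) [DecidablePred p] (n : Int) :
    l.foldl (fun acc x => if p x then acc + 1 else acc) n
      = n + ((l.countP (fun x => decide (p x)) : Nat) : Int) := by
  induction l generalizing n with
  | nil => simp
  | cons x xs ih =>
    by_cases h : p x <;> simp [h, ih] <;> ring

theorem pvGather_eq_countP (nrows ncols : Int) (A : Int → Int → Prop)
    [inst : ∀ x y, Decidable (A x y)] (row col : Int) :
    pvGather nrows ncols A row col
      = ((pvOff.countP (fun o => decide (¬(o.1 = 0 ∧ o.2 = 0) ∧ 0 ≤ row + o.1 ∧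
          row + o.1 < nrows ∧ 0 ≤ col + o.2 ∧ col + o.2 < ncols ∧
          A (row + o.1) (col + o.2))) : Nat) : Int) := by
  unfold pvGather
  have hbody : ∀ (dr dc nb : Int),
      (if dr = 0 ∧ dc = 0 then nb
       else if 0 ≤ row + dr ∧ row + dr < nrows ∧ 0 ≤ col + dc ∧ col + dc < ncols ∧
          A (row + dr) (col + dc) then nb + 1 else nb)
      = (if ¬(dr = 0 ∧ dc = 0) ∧ 0 ≤ row + dr ∧ row + dr < nrows ∧ 0 ≤ col + dc ∧
          col + dc < ncols ∧ A (row + dr) (col + dc) then nb + 1 else nb) := by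
    intro dr dc nb
    by_cases h : dr = 0 ∧ dc = 0 <;> simp [h]
  simp only [hbody]
  have h2 : ∀ (dr : Int) (nb : Int),
      (PySem.List.pyRange (-1) 2).foldl (fun nb dc =>
        if ¬(dr = 0 ∧ dc = 0) ∧ 0 ≤ row + dr ∧ row + dr < nrows ∧ 0 ≤ col + dc ∧
            col + dc < ncols ∧ A (row + dr) (col + dc) then nb + 1 else nb) nb
      = ((PySem.List.pyRange (-1) 2).map (Prod.mk dr)).foldl (fun nb k =>
          if ¬(k.1 = 0 ∧ k.2 = 0) ∧ 0 ≤ row + k.1 ∧ row + k.1 < nrows ∧ 0 ≤ col + k.2 ∧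
              col + k.2 < ncols ∧ A (row + k.1) (col + k.2) then nb + 1 else nb) nb := by
    intro dr nb
    rw [List.foldl_map]
  simp only [h2]
  rw [pvFoldlFlatMap, ← pvProdFlatMap]
  rw [pvFoldlCountP _ (fun (k : Int × Int) => ¬(k.1 = 0 ∧ k.2 = 0) ∧ 0 ≤ row + k.1 ∧
      row + k.1 < nrows ∧ 0 ≤ col + k.2 ∧ col + k.2 < ncols ∧
      A (row + k.1) (col + k.2))]
  rw [zero_add]
  rfl

theorem pvCount_keys (nrows ncols : Int) (A : Int → Int → Prop)
    [inst : ∀ x y, Decidable (A x y)] (r c : Int)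
    (hr : 0 ≤ r) (hr' : r < nrows) (hc : 0 ≤ c) (hc' : c < ncols) :
    ((pvKeys nrows ncols A).count (r, c) : Int) = pvGather nrows ncols A r c := by
  have hkeys : pvKeys nrows ncols A
      = (pvPairs nrows ncols).flatMap
          (fun p => if A p.1 p.2 then pvNk nrows ncols p.1 p.2 else []) := by
    rw [pvKeys, pvPairs, pvProdFlatMap, List.flatMap_assoc]
    simp only [List.flatMap_map]
  have hle : ∀ p ∈ pvPairs nrows ncols,
      ((if A p.1 p.2 then pvNk nrows ncols p.1 p.2 else []).count (r, c)) ≤ 1 := by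
    intro p _
    split
    · exact List.nodup_iff_count_le_one.mp (pvNk_nodup nrows ncols p.1 p.2) _
    · simp
  rw [hkeys, pvCountFlatMap _ _ _ hle]
  rw [List.countP_congr (q := fun p =>
      decide (A p.1 p.2) && decide ((r, c) ∈ pvNk nrows ncols p.1 p.2)) (by
    intro p _
    by_cases hA : A p.1 p.2 <;> simp [hA])]
  have hlnodup : (pvPairs nrows ncols).Nodup :=
    (PySem.List.nodup_pyRange_one _ _).product (PySem.List.nodup_pyRange_one _ _)
  have hboxnodup : (pvOff.map (fun o => (r + o.1, c + o.2))).Nodup := by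
    refine List.Nodup.map ?_
      ((PySem.List.nodup_pyRange_one _ _).product (PySem.List.nodup_pyRange_one _ _))
    intro o1 o2 h
    obtain ⟨a1, b1⟩ := o1; obtain ⟨a2, b2⟩ := o2
    simp only [Prod.mk.injEq] at h ⊢
    omega
  have hsupp : ∀ p ∈ pvPairs nrows ncols,
      (decide (A p.1 p.2) && decide ((r, c) ∈ pvNk nrows ncols p.1 p.2)) = true →
        p ∈ pvOff.map (fun o => (r + o.1, c + o.2)) := by
    intro p hp hq
    obtain ⟨p1, p2⟩ := p
    simp only [Bool.and_eq_true, decide_eq_true_eq, pvMem_pvNk] at hq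
    obtain ⟨-, ⟨hx1, hx2⟩, ⟨hy1, hy2⟩, -⟩ := hq
    simp only [max_le_iff, lt_min_iff] at hx1 hx2 hy1 hy2
    simp only [List.mem_map, pvOff, List.pair_mem_product, PySem.List.mem_pyRange_one,
      Prod.exists, Prod.mk.injEq]
    exact ⟨p1 - r, p2 - c, ⟨⟨by omega, by omega⟩, ⟨by omega, by omega⟩⟩, by omega, by omega⟩
  rw [pvCountPBox _ _ _ hlnodup hboxnodup hsupp]
  rw [List.countP_map]
  rw [pvGather_eq_countP]
  congr 1
  apply List.countP_congr
  intro o ho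
  obtain ⟨o1, o2⟩ := o
  have hmo : (-1 ≤ o1 ∧ o1 < 2) ∧ (-1 ≤ o2 ∧ o2 < 2) := by
    simpa [pvOff, List.pair_mem_product, PySem.List.mem_pyRange_one] using ho
  simp only [Function.comp_apply, Bool.and_eq_true, decide_eq_true_eq, pvMem_pvPairs, pvMem_pvNk]
  simp only [max_le_iff, lt_min_iff, not_and]
  constructor
  · rintro ⟨h1, hA, h2, h3, h4⟩
    exact ⟨by omega, h1.1.1, h1.1.2, h1.2.1, h1.2.2, hA⟩
  · rintro ⟨hctr, hb1, hb2, hb3, hb4, hA⟩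
    exact ⟨⟨⟨hb1, hb2⟩, ⟨hb3, hb4⟩⟩, hA, ⟨by omega, by omega⟩, ⟨by omega, by omega⟩, by omega⟩

-- assembling the two ports --------------------------------------------------

theorem pvMain (grid : List (List String)) :
    to_remove_rolls grid = to_remove_rolls_alt grid := by
  show (PySem.List.pyRange 0 (grid.length : Int)).foldl (fun res row =>
      (PySem.List.pyRange 0 ((PySem.List.pyGetD grid 0 []).length : Int)).foldl (fun res col =>
        if PySem.List.pyGetD (PySem.List.pyGetD grid row []) col "" = "@" then
          if pvGather (grid.length : Int) ((PySem.List.pyGetD grid 0 []).length : Int)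
              (fun x y => PySem.List.pyGetD (PySem.List.pyGetD grid x []) y "" = "@") row col < 4
          then res ++ [(row, col)] else res
        else res) res) []
    = (PySem.List.pyRange 0 (grid.length : Int)).foldl (fun res row =>
      (PySem.List.pyRange 0 ((PySem.List.pyGetD grid 0 []).length : Int)).foldl (fun res col =>
        if PySem.List.pyGetD (PySem.List.pyGetD grid row []) col "" = "@" ∧
            (pvScatter (grid.length : Int) ((PySem.List.pyGetD grid 0 []).length : Int)
              (fun x y => PySem.List.pyGetD (PySem.List.pyGetD grid x []) y "" = "@")).getD
                (row, col) 0 < 4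
          then res ++ [(row, col)] else res) res) []
  apply PySem.List.foldl_congr_mem
  intro res row hrow
  apply PySem.List.foldl_congr_mem
  intro res2 col hcol
  rw [PySem.List.mem_pyRange_one] at hrow hcol
  rw [pvScatter_getD, pvCount_keys _ _ _ _ _ hrow.1 hrow.2 hcol.1 hcol.2]
  by_cases hP : PySem.List.pyGetD (PySem.List.pyGetD grid row []) col "" = "@" <;>
    by_cases h4 : pvGather (grid.length : Int) ((PySem.List.pyGetD grid 0 []).length : Int)
        (fun x y => PySem.List.pyGetD (PySem.List.pyGetD grid x []) y "" = "@") row col < 4 <;>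
    simp [hP, h4]

-- ===== VERDICT (by name: the statement is the Claim_ definition above) =====
theorem to_remove_rolls_spec : Claim_equal_to_remove_rolls := by
  intro grid _ _
  unfold Spec_to_remove_rolls
  exact pvMain grid
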